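-- pv_equiv track=rewrite | github.com/cjmaloof/ggo | py/ggo.py | getBestGamesByGroup
-- ===== SOURCE A (Python) =====
-- import itertools
--
-- def singleGroupCombinations(playerCount, tableCount):
--     players = range(0, playerCount)
--     (playersPerGroup, extraPlayers) = divmod(playerCount, tableCount)
--     groupOptions = itertools.combinations(players, playersPerGroup)
--     if extraPlayers > 0:
--         groupOptions = itertools.chain(groupOptions, itertools.combinations(players, playersPerGroup+1))
--     return groupOptions
--
-- def getBestGamesByGroup(playerCount, tableCount, penalties, gameCount):
--     result = dict()
--     games = range(0, gameCount)
--     for group in singleGroupCombinations(playerCount, tableCount):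
--         scores = [scoreOneGame(group, g, penalties, gameCount) for g in games]
--         bestScore = min(scores)
--         result[group] = [s for s in enumerate(scores) if s[1] == bestScore]
--     return result
--
-- def scoreOneGame(group, game, penalties, gameCount):
--     score = 0
--     for player in group:
--         score += penalties[(player * gameCount) + game]
--     return score
-- ===== SOURCE B (Python) =====
-- import itertools
--
-- def singleGroupCombinations(playerCount, tableCount):
--     players = range(0, playerCount)
--     (playersPerGroup, extraPlayers) = divmod(playerCount, tableCount)
--     groupOptions = itertools.combinations(players, playersPerGroup)
--     if extraPlayers > 0:
--         groupOptions = itertools.chain(groupOptions, itertools.combinations(players, playersPerGroup + 1))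
--     return groupOptions
--
-- def getBestGamesByGroup(playerCount, tableCount, penalties, gameCount):
--     # Slice each player's penalty row out of the flat list once; a group's score
--     # vector is the elementwise (zip) sum of its players' rows; the best games are
--     # the leading run of the stably sorted (game, score) pairs.
--     rows = [penalties[p * gameCount:(p + 1) * gameCount] for p in range(playerCount)]
--     result = {}
--     for group in singleGroupCombinations(playerCount, tableCount):
--         scores = [0] * gameCount
--         for p in group:
--             scores = [a + b for (a, b) in zip(scores, rows[p])]
--         ranked = sorted(enumerate(scores), key=lambda t: t[1])
--         _, tied = next(itertools.groupby(ranked, key=lambda t: t[1]))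
--         result[group] = list(tied)
--     return result
-- ===== Notes on version B (the rewrite author's own statement) =====
-- stated objective: alternative
-- what changed: B slices each player's penalty row out of the flat list once, builds a group's score vector as the elementwise zip-sum of those rows, and takes the leading run of the stably sorted (game, score) pairs, replacing A's per-game scoreOneGame indexing followed by min() and an enumerate filter.
import Mathlib
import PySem

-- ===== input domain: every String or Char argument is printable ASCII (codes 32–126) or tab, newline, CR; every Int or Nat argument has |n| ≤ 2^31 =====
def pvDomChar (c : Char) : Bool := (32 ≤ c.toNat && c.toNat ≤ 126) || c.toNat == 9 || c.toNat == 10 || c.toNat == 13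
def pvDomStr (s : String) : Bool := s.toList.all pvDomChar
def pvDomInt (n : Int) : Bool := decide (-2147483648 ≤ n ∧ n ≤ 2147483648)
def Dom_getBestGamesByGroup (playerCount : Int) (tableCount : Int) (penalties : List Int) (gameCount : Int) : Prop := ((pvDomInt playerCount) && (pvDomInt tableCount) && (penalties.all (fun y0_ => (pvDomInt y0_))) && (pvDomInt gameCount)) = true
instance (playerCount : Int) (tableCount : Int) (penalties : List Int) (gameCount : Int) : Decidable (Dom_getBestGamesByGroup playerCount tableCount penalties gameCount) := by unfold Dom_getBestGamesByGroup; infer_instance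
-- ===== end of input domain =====

-- B replaces A's per-game scoreOneGame/min/filter passes by sliced per-player penalty rows
-- combined with elementwise zip-sums, then a stable sort of (game, score) pairs whose leading
-- run is the answer (objective: alternative).

-- ===== PORT A =====
-- helper: scoreOneGame; penalties[(player*gameCount)+game] is PySem.List.pyGetD with default 0 —
-- exact under Pre_, which guarantees the index is in range (Python raises IndexError otherwise)
def pvScoreOneGame (group : List Int) (game : Int) (penalties : List Int) (gameCount : Int) : Int :=
  group.foldl (fun score player => score + PySem.List.pyGetD penalties (player * gameCount + game) 0) 0

-- shared helper: singleGroupCombinations; playersPerGroup.toNat is exact under Pre_ (0 ≤ playersPerGroup;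
-- Python's itertools.combinations raises ValueError on a negative r, excluded by Pre_)
def pvSingleGroupCombinations (playerCount : Int) (tableCount : Int) : List (List Int) :=
  let players := PySem.List.pyRange 0 playerCount 1
  let playersPerGroup := PySem.Int.floordiv playerCount tableCount
  let extraPlayers := PySem.Int.mod playerCount tableCount
  let groupOptions := PySem.List.combinations players playersPerGroup.toNat
  if extraPlayers > 0 then groupOptions ++ PySem.List.combinations players (playersPerGroup + 1).toNat
  else groupOptions

def getBestGamesByGroup (playerCount : Int) (tableCount : Int) (penalties : List Int) (gameCount : Int) : List (List Int × List (Int × Int)) :=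
  let games := PySem.List.pyRange 0 gameCount 1
  ((pvSingleGroupCombinations playerCount tableCount).foldl
    (fun (result : PySem.Dict (List Int) (List (Int × Int))) group =>
      let scores := games.map (fun g => pvScoreOneGame group g penalties gameCount)
      -- min(scores): .getD 0 is never hit under Pre_ (scores nonempty whenever a group exists)
      let bestScore := (PySem.List.min? scores (fun x => x)).getD 0
      result.insert group ((PySem.List.enumerate scores 0).filter (fun s => s.2 == bestScore)))
    PySem.Dict.empty).items

-- ===== PORT B =====
def getBestGamesByGroup_alt (playerCount : Int) (tableCount : Int) (penalties : List Int) (gameCount : Int) : List (List Int × List (Int × Int)) :=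
  -- rows: each player's penalty slice, computed once
  let rows := (PySem.List.pyRange 0 playerCount 1).map
      (fun p => PySem.List.slice penalties (some (p * gameCount)) (some ((p + 1) * gameCount)))
  ((pvSingleGroupCombinations playerCount tableCount).foldl
    (fun (result : PySem.Dict (List Int) (List (Int × Int))) group =>
      -- rows[p]: pyGetD with default [] is exact under Pre_ (0 ≤ p < playerCount)
      let scores := group.foldl
        (fun sc p => ((sc.zip (PySem.List.pyGetD rows p [])).map (fun ab => ab.1 + ab.2)))
        (PySem.List.pyRepeat [0] gameCount)
      let ranked := PySem.List.sorted (PySem.List.enumerate scores 0) (fun t => t.2)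
      -- next(itertools.groupby(ranked, key))'s group = the leading run of equal keys;
      -- on an empty ranked Python raises StopIteration, excluded by Pre_
      result.insert group (ranked.takeWhile (fun t => t.2 == ranked.headI.2)))
    PySem.Dict.empty).items

-- ===== PRECONDITION & SPEC =====
-- Pre_ is exactly the set of inputs where Python A returns: tableCount ≠ 0 (else ZeroDivisionError),
-- playersPerGroup = playerCount//tableCount ≥ 0 (else combinations raises ValueError), and either
-- gameCount > 0 with penalties long enough for every accessed index (else IndexError), or
-- gameCount ≤ 0 with no group at all (playerCount < 0 and playersPerGroup ≥ 1), since with a group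
-- present min([]) raises ValueError (B raises StopIteration there).
def Pre_getBestGamesByGroup (playerCount : Int) (tableCount : Int) (penalties : List Int) (gameCount : Int) : Prop :=
  tableCount ≠ 0 ∧ 0 ≤ PySem.Int.floordiv playerCount tableCount ∧
    ((0 < gameCount ∧ playerCount * gameCount ≤ (penalties.length : Int)) ∨
     (gameCount ≤ 0 ∧ playerCount < 0 ∧ 1 ≤ PySem.Int.floordiv playerCount tableCount))
instance (playerCount : Int) (tableCount : Int) (penalties : List Int) (gameCount : Int) : Decidable (Pre_getBestGamesByGroup playerCount tableCount penalties gameCount) := by unfold Pre_getBestGamesByGroup; infer_instance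

def pvWitness_getBestGamesByGroup : Int × Int × List Int × Int := (2, 1, [1, 2, 3, 4], 2)

def Spec_getBestGamesByGroup (playerCount : Int) (tableCount : Int) (penalties : List Int) (gameCount : Int) (out : List (List Int × List (Int × Int))) : Prop := out = getBestGamesByGroup_alt playerCount tableCount penalties gameCount
instance (playerCount : Int) (tableCount : Int) (penalties : List Int) (gameCount : Int) (out : List (List Int × List (Int × Int))) : Decidable (Spec_getBestGamesByGroup playerCount tableCount penalties gameCount out) := by unfold Spec_getBestGamesByGroup; infer_instance

-- ===== CLAIM (what is proved, stated in full; the proofs are below) =====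
def Claim_equal_getBestGamesByGroup : Prop := ∀ (playerCount : Int) (tableCount : Int) (penalties : List Int) (gameCount : Int), Dom_getBestGamesByGroup playerCount tableCount penalties gameCount → Pre_getBestGamesByGroup playerCount tableCount penalties gameCount → Spec_getBestGamesByGroup playerCount tableCount penalties gameCount (getBestGamesByGroup playerCount tableCount penalties gameCount)

-- ===== LEMMAS AND PROOFS =====

-- inserting an element into a list whose entries all have key ≥ m grows the leading m-run
-- by x exactly when x's key is m (no sortedness needed)
lemma pvTakeWhile_insertBy (m : Int) (x : Int × Int) (hx : m ≤ x.2) :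
    ∀ (s : List (Int × Int)), (∀ t ∈ s, m ≤ t.2) →
    (PySem.List.insertBy (fun a b => decide (a.2 < b.2)) x s).takeWhile (fun t => t.2 == m)
      = s.takeWhile (fun t => t.2 == m) ++ (if x.2 == m then [x] else []) := by
  intro s
  induction s with
  | nil =>
      intro _
      by_cases h : x.2 = m <;> simp [PySem.List.insertBy, List.takeWhile, h]
  | cons y ys ih =>
      intro hge
      have hy : m ≤ y.2 := hge y (by simp)
      simp only [PySem.List.insertBy]
      by_cases hb : x.2 < y.2
      · rw [if_pos (by simpa using hb)]
        have hyne : ¬ (y.2 = m) := by omega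
        by_cases hxm : x.2 = m
        · simp [hxm, hyne]
        · simp [hxm, hyne]
      · rw [if_neg (by simpa using hb)]
        have hyx : y.2 ≤ x.2 := by omega
        by_cases hym : y.2 = m
        · have ihy := ih (fun t ht => hge t (List.mem_cons_of_mem y ht))
          simp [hym, ihy]
        · have hxm : ¬ (x.2 = m) := by omega
          simp [hym, hxm]

-- the leading run of the stable sort at the minimum key m is the filter at m, in input order
lemma pvSorted_run (m : Int) (l : List (Int × Int)) (hall : ∀ t ∈ l, m ≤ t.2) :
    (PySem.List.sorted l (fun t => t.2)).takeWhile (fun t => t.2 == m)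
      = l.filter (fun t => t.2 == m) := by
  induction l using List.reverseRecOn with
  | nil => simp [PySem.List.sorted]
  | append_singleton l x ih =>
    have hx : m ≤ x.2 := hall x (by simp)
    have hl : ∀ t ∈ l, m ≤ t.2 := fun t ht => hall t (by simp [ht])
    have hsorted : PySem.List.sorted (l ++ [x]) (fun t => t.2)
        = PySem.List.insertBy (fun a b => decide (a.2 < b.2)) x
            (PySem.List.sorted l (fun t => t.2)) := by
      rw [PySem.List.sorted_eq_foldl_insertBy, PySem.List.sorted_eq_foldl_insertBy,
        List.foldl_append]
      rfl
    rw [hsorted,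
      pvTakeWhile_insertBy m x hx _
        (fun t ht => hl t ((PySem.List.mem_sorted l _ _ t).mp ht)),
      ih hl, List.filter_append]
    by_cases h : x.2 = m <;> simp [h]

-- sort-then-leading-run equals A's min-then-filter, for nonempty xs
lemma pvTied_eq_filter (xs : List Int) (hne : xs ≠ []) :
    (PySem.List.sorted (PySem.List.enumerate xs 0) (fun t => t.2)).takeWhile
        (fun t => t.2 == (PySem.List.sorted (PySem.List.enumerate xs 0) (fun t => t.2)).headI.2)
      = (PySem.List.enumerate xs 0).filter
          (fun s => s.2 == (PySem.List.min? xs (fun x => x)).getD 0) := by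
  obtain ⟨mv, hmv⟩ : ∃ mv, PySem.List.min? xs (fun x => x) = some mv := by
    cases h : PySem.List.min? xs (fun x => x) with
    | none => exact absurd ((PySem.List.min?_eq_none_iff xs _).mp h) hne
    | some m => exact ⟨m, rfl⟩
  have hmv_min : ∀ y ∈ xs, mv ≤ y := PySem.List.min?_isMin hmv
  have hmv_mem : mv ∈ xs := PySem.List.min?_mem hmv
  have hrne : PySem.List.sorted (PySem.List.enumerate xs 0) (fun t => t.2) ≠ [] := by
    intro h
    have henum := (PySem.List.sorted_eq_nil_iff _ _ _).mp h
    have := congrArg List.length henum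
    simp [PySem.List.length_enumerate] at this
    exact hne this
  obtain ⟨h0, tl, hcons⟩ : ∃ h0 tl,
      PySem.List.sorted (PySem.List.enumerate xs 0) (fun t => t.2) = h0 :: tl := by
    cases h : PySem.List.sorted (PySem.List.enumerate xs 0) (fun t => t.2) with
    | nil => exact absurd h hrne
    | cons a b => exact ⟨a, b, rfl⟩
  have hhead_le : ∀ y ∈ PySem.List.enumerate xs 0, h0.2 ≤ y.2 :=
    PySem.List.key_head_sorted_le _ _ hcons
  have h0mem : h0 ∈ PySem.List.enumerate xs 0 := by
    have : h0 ∈ PySem.List.sorted (PySem.List.enumerate xs 0) (fun t => t.2) := by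
      rw [hcons]; exact List.mem_cons_self
    exact (PySem.List.mem_sorted _ _ _ _).mp this
  have hge : ∀ t ∈ PySem.List.enumerate xs 0, mv ≤ t.2 := by
    intro t ht
    rcases (PySem.List.mem_enumerate_iff _ _ _).mp ht with ⟨k, hk, hp⟩
    rw [hp]; exact hmv_min _ (List.getElem_mem hk)
  have hkey : h0.2 = mv := by
    apply le_antisymm
    · obtain ⟨k, hk, hkv⟩ := List.mem_iff_getElem.mp hmv_mem
      have hmem : ((0:Int) + (k : Int), xs[k]) ∈ PySem.List.enumerate xs 0 :=
        (PySem.List.mem_enumerate_iff _ _ _).mpr ⟨k, hk, rfl⟩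
      have := hhead_le _ hmem
      simpa [hkv] using this
    · exact hge h0 h0mem
  have hheadI : (PySem.List.sorted (PySem.List.enumerate xs 0) (fun t => t.2)).headI = h0 := by
    rw [hcons]; rfl
  rw [hmv, Option.getD_some, hheadI, hkey]
  exact pvSorted_run mv _ hge

-- a sufficiently long slice of the flat penalty list, as a map over the game range
lemma pvSlice_eq_map (pen : List Int) (p gc : Int) (hp : 0 ≤ p) (hgc : 0 ≤ gc)
    (hlen : (p + 1) * gc ≤ (pen.length : Int)) :
    PySem.List.slice pen (some (p * gc)) (some ((p + 1) * gc))
      = (PySem.List.pyRange 0 gc 1).map (fun g => PySem.List.pyGetD pen (p * gc + g) 0) := by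
  have ha : 0 ≤ p * gc := mul_nonneg hp hgc
  have hb : 0 ≤ (p + 1) * gc := mul_nonneg (by omega) hgc
  have hsum : (p + 1) * gc = p * gc + gc := by ring
  have halen : p * gc ≤ (pen.length : Int) := by omega
  rw [PySem.List.slice_of_nonneg pen ha hb halen hlen]
  apply List.ext_getElem
  · simp only [List.length_take, List.length_drop, List.length_map,
      PySem.List.length_pyRange_one]
    omega
  · intro i h1 h2
    have hi : i < gc.toNat := by
      simp only [List.length_map, PySem.List.length_pyRange_one] at h2; omega
    have hlt : (p * gc).toNat + i < pen.length := by omega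
    rw [List.getElem_take, List.getElem_drop]
    have hr : ((PySem.List.pyRange 0 gc 1).map
        (fun g => PySem.List.pyGetD pen (p * gc + g) 0))[i]
          = PySem.List.pyGetD pen (p * gc + ((0 : Int) + (i : Int))) 0 := by
      rw [List.getElem_map, PySem.List.getElem_pyRange_one]
    rw [hr, PySem.List.pyGetD_eq_getElem pen 0 (by omega) (by omega)]
    congr 1
    omega

-- the zip-sum loop over the group, started from any mapped initial vector, is the
-- per-game fold of the same additions
lemma pvZipSum (gc : Int) (rowfn : Int → List Int) (f : Int → Int → Int) :
    ∀ (group : List Int) (h : Int → Int),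
      (∀ p ∈ group, rowfn p = (PySem.List.pyRange 0 gc 1).map (f p)) →
      group.foldl (fun sc p => (sc.zip (rowfn p)).map (fun ab => ab.1 + ab.2))
          ((PySem.List.pyRange 0 gc 1).map h)
        = (PySem.List.pyRange 0 gc 1).map
            (fun g => group.foldl (fun a p => a + f p g) (h g)) := by
  intro group
  induction group with
  | nil => intro h _; simp
  | cons p t ih =>
      intro h hrow
      have hp := hrow p (by simp)
      simp only [List.foldl_cons]
      rw [hp, List.zip_map', List.map_map]
      have hcomp : ((fun ab : Int × Int => ab.1 + ab.2) ∘ fun a => (h a, f p a))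
          = fun a => h a + f p a := by funext a; simp
      rw [hcomp, ih (fun g => h g + f p g) (fun q hq => hrow q (by simp [hq]))]

-- members of any group produced by singleGroupCombinations are players 0 ≤ p < playerCount
lemma pvMem_groups {pc tc : Int} {group : List Int}
    (hg : group ∈ pvSingleGroupCombinations pc tc) : ∀ p ∈ group, 0 ≤ p ∧ p < pc := by
  intro p hp
  unfold pvSingleGroupCombinations at hg
  simp only at hg
  have hsub : group.Sublist (PySem.List.pyRange 0 pc 1) := by
    split_ifs at hg with h
    · rcases List.mem_append.mp hg with h1 | h1
      · exact ((PySem.List.mem_combinations_iff _ _ _).mp h1).1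
      · exact ((PySem.List.mem_combinations_iff _ _ _).mp h1).1
    · exact ((PySem.List.mem_combinations_iff _ _ _).mp hg).1
  have := PySem.List.mem_pyRange_one.mp (hsub.subset hp)
  omega

-- per-group: B's sliced zip-sum + sort + leading run equals A's score/min/filter value
lemma pvGroupEq (pen : List Int) (pc gc : Int) (group : List Int)
    (hgc : 0 < gc) (hlen : pc * gc ≤ (pen.length : Int))
    (hb : ∀ p ∈ group, 0 ≤ p ∧ p < pc) :
    (PySem.List.sorted (PySem.List.enumerate
        (group.foldl
          (fun sc p => ((sc.zip (PySem.List.pyGetD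
              ((PySem.List.pyRange 0 pc 1).map
                (fun q => PySem.List.slice pen (some (q * gc)) (some ((q + 1) * gc)))) p [])).map
            (fun ab => ab.1 + ab.2)))
          (PySem.List.pyRepeat [0] gc)) 0) (fun t => t.2)).takeWhile
      (fun t => t.2 == (PySem.List.sorted (PySem.List.enumerate
        (group.foldl
          (fun sc p => ((sc.zip (PySem.List.pyGetD
              ((PySem.List.pyRange 0 pc 1).map
                (fun q => PySem.List.slice pen (some (q * gc)) (some ((q + 1) * gc)))) p [])).map
            (fun ab => ab.1 + ab.2)))
          (PySem.List.pyRepeat [0] gc)) 0) (fun t => t.2)).headI.2)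
    = (PySem.List.enumerate
        ((PySem.List.pyRange 0 gc 1).map (fun g => pvScoreOneGame group g pen gc)) 0).filter
        (fun s => s.2 ==
          (PySem.List.min? ((PySem.List.pyRange 0 gc 1).map (fun g => pvScoreOneGame group g pen gc))
            (fun x => x)).getD 0) := by
  have hrow : ∀ p ∈ group,
      PySem.List.pyGetD
        ((PySem.List.pyRange 0 pc 1).map
          (fun q => PySem.List.slice pen (some (q * gc)) (some ((q + 1) * gc)))) p []
      = (PySem.List.pyRange 0 gc 1).map (fun g => PySem.List.pyGetD pen (p * gc + g) 0) := by
    intro p hpmem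
    obtain ⟨hp0, hplt⟩ := hb p hpmem
    have hpc : 0 ≤ pc := by omega
    have hcast : PySem.List.pyGetD
        ((PySem.List.pyRange 0 ((pc.toNat : Int)) 1).map
          (fun q => PySem.List.slice pen (some (q * gc)) (some ((q + 1) * gc)))) ((p.toNat : Int)) []
        = PySem.List.slice pen (some ((p.toNat : Int) * gc)) (some (((p.toNat : Int) + 1) * gc)) :=
      PySem.List.pyGetD_map_pyRange _ pc.toNat p.toNat [] (by omega)
    rw [Int.toNat_of_nonneg hp0, Int.toNat_of_nonneg hpc] at hcast
    rw [hcast]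
    exact pvSlice_eq_map pen p gc hp0 (by omega)
      (le_trans (by nlinarith) hlen)
  have hrep : PySem.List.pyRepeat [(0 : Int)] gc
      = (PySem.List.pyRange 0 gc 1).map (fun _ => (0 : Int)) := by
    rw [PySem.List.pyRepeat_singleton, List.map_const', PySem.List.length_pyRange_one]
    norm_num
  have hscores : group.foldl
      (fun sc p => ((sc.zip (PySem.List.pyGetD
          ((PySem.List.pyRange 0 pc 1).map
            (fun q => PySem.List.slice pen (some (q * gc)) (some ((q + 1) * gc)))) p [])).map
        (fun ab => ab.1 + ab.2)))
      (PySem.List.pyRepeat [0] gc)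
      = (PySem.List.pyRange 0 gc 1).map (fun g => pvScoreOneGame group g pen gc) := by
    rw [hrep, pvZipSum gc _ (fun p g => PySem.List.pyGetD pen (p * gc + g) 0) group
      (fun _ => 0) hrow]
    rfl
  rw [hscores]
  apply pvTied_eq_filter
  rw [PySem.List.pyRange_one_cons hgc]
  simp

-- ===== VERDICT (by name: the statement is the Claim_ definition above) =====
theorem getBestGamesByGroup_spec : Claim_equal_getBestGamesByGroup := by
  intro pc tc pen gc _ hpre
  unfold Spec_getBestGamesByGroup getBestGamesByGroup getBestGamesByGroup_alt
  obtain ⟨htc, hppg, hcase⟩ := hpre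
  rcases hcase with ⟨hgc, hlen⟩ | ⟨hgc, hpc, hppg1⟩
  · -- main case: 0 < gameCount, penalties long enough
    refine congrArg PySem.Dict.items ?_
    refine PySem.List.foldl_congr_mem _ _ _ _ ?_
    intro acc group hg
    exact congrArg (acc.insert group)
      (pvGroupEq pen pc gc group hgc hlen (pvMem_groups hg)).symm
  · -- no games and no groups: both folds run over the empty group list
    have hplayers : PySem.List.pyRange 0 pc 1 = [] :=
      PySem.List.pyRange_one_eq_nil (by omega)
    have h1 : PySem.List.combinations (PySem.List.pyRange 0 pc 1)
        (PySem.Int.floordiv pc tc).toNat = [] := by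
      rw [hplayers]
      obtain ⟨r, hr⟩ : ∃ r, (PySem.Int.floordiv pc tc).toNat = r + 1 :=
        ⟨(PySem.Int.floordiv pc tc).toNat - 1, by omega⟩
      rw [hr]; exact PySem.List.combinations_nil_succ r
    have h2 : PySem.List.combinations (PySem.List.pyRange 0 pc 1)
        (PySem.Int.floordiv pc tc + 1).toNat = [] := by
      rw [hplayers]
      obtain ⟨r, hr⟩ : ∃ r, (PySem.Int.floordiv pc tc + 1).toNat = r + 1 :=
        ⟨(PySem.Int.floordiv pc tc + 1).toNat - 1, by omega⟩
      rw [hr]; exact PySem.List.combinations_nil_succ r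
    have hgroups : pvSingleGroupCombinations pc tc = [] := by
      unfold pvSingleGroupCombinations
      simp only
      split_ifs <;> simp [h1, h2]
    rw [hgroups]
    rfl
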